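-- pv_equiv track=rewrite | github.com/cchoquette/membership-inference | utils.py | create_translates
-- ===== SOURCE A (Python) =====
-- def create_translates(d):
--   """Creates vector of translation displacements compatible with scipy' translate.
--
--   Args:
--     d: param d for translation augmentation attack. Defines max displacement by d. Leads to 4*d+1 total images per sample.
--
--   Returns: vector of translation displacements compatible with scipy' translate.
--   """
--   if d is None:
--     return None
--   def all_shifts(mshift):
--     if mshift == 0:
--       return [(0, 0, 0, 0)]
--     all_pairs = []
--     start = (0, mshift, 0, 0)
--     end = (0, mshift, 0, 0)
--     vdir = -1
--     hdir = -1
--     first_time = True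
--     while (start[1] != end[1] or start[2] != end[2]) or first_time:
--       all_pairs.append(start)
--       start = (0, start[1] + vdir, start[2] + hdir, 0)
--       if abs(start[1]) == mshift:
--         vdir *= -1
--       if abs(start[2]) == mshift:
--         hdir *= -1
--       first_time = False
--     all_pairs = [(0, 0, 0, 0)] + all_pairs  # add no shift
--     return all_pairs
--
--   translates = all_shifts(d)
--   return translates
-- ===== SOURCE B (Python) =====
-- def create_translates(d):
--   """Diamond translation displacements: center plus the four edges of the
--   radius-d diamond, built directly instead of simulating the bouncing walk."""
--   if d is None:
--     return None
--   if d == 0: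
--     return [(0, 0, 0, 0)]
--   pts = [(0, 0, 0, 0)]
--   pts += [(0, d - k, -k, 0) for k in range(d)]
--   pts += [(0, -k, -d + k, 0) for k in range(d)]
--   pts += [(0, -d + k, k, 0) for k in range(d)]
--   pts += [(0, k, d - k, 0) for k in range(d)]
--   return pts
-- ===== Notes on version B (the rewrite author's own statement) =====
-- stated objective: simpler
-- what changed: Replaces the stateful direction-bouncing while-loop simulation with a direct closed-form construction: the center point plus four comprehensions, one per diamond edge, producing the identical ordered list.
import Mathlib
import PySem

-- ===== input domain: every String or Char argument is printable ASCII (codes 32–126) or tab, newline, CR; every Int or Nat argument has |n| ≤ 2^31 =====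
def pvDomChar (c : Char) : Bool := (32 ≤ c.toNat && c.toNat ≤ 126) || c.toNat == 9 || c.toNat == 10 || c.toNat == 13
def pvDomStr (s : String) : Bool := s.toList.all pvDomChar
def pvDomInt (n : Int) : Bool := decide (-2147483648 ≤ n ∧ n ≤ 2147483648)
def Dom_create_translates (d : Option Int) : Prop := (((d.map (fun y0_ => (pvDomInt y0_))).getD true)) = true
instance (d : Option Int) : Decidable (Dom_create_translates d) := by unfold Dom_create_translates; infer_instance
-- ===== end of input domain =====

-- B replaces A's stateful direction-bouncing while-loop with a direct construction
-- of the four diamond edges (simpler decomposition, same O(d) cost; return value only).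


-- ===== PORT A =====
-- A's while-loop; the (never reassigned) 'end' is carried as parameters ev/eh and
-- the loop gets fuel 4*d+1, enough for every d ≥ 0 (d < 0, where the Python loop
-- never terminates, is excluded by Pre_).
def ctLoopA (mshift ev eh : Int) : Nat → Int → Int → Int → Int → Bool → List (Int × Int × Int × Int)
  | 0, _, _, _, _, _ => []
  | fuel+1, sv, sh, vdir, hdir, ft =>
    if (sv ≠ ev ∨ sh ≠ eh) ∨ ft then
      let sv' := sv + vdir
      let sh' := sh + hdir
      let vdir' := if |sv'| = mshift then vdir * (-1) else vdir
      let hdir' := if |sh'| = mshift then hdir * (-1) else hdir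
      (0, sv, sh, 0) :: ctLoopA mshift ev eh fuel sv' sh' vdir' hdir' false
    else []

def create_translates (d : Option Int) : Option (List (Int × Int × Int × Int)) :=
  match d with
  | none => none
  | some dv =>
    if dv = 0 then some [(0, 0, 0, 0)]
    else some ((0, 0, 0, 0) :: ctLoopA dv dv 0 ((4 * dv).toNat + 1) dv 0 (-1) (-1) true)

-- ===== PORT B =====
def create_translates_alt (d : Option Int) : Option (List (Int × Int × Int × Int)) :=
  match d with
  | none => none
  | some dv =>
    if dv = 0 then some [(0, 0, 0, 0)]
    else
      some ((0, 0, 0, 0) ::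
        ((List.range dv.toNat).map (fun k => (0, dv - (k : Int), -(k : Int), 0)) ++
         (List.range dv.toNat).map (fun k => (0, -(k : Int), -dv + (k : Int), 0)) ++
         (List.range dv.toNat).map (fun k => (0, -dv + (k : Int), (k : Int), 0)) ++
         (List.range dv.toNat).map (fun k => (0, (k : Int), dv - (k : Int), 0))))

-- ===== PRECONDITION & SPEC =====
-- Pre_ excludes negative d, on which the Python A's while-loop never terminates
-- (|start[1]| / |start[2]| can never equal a negative mshift, so no direction flip ever happens).
def Pre_create_translates (d : Option Int) : Prop := 0 ≤ d.getD 0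
instance (d : Option Int) : Decidable (Pre_create_translates d) := by unfold Pre_create_translates; infer_instance

def pvWitness_create_translates : Option Int := some 2

def Spec_create_translates (d : Option Int) (out : Option (List (Int × Int × Int × Int))) : Prop := out = create_translates_alt d
instance (d : Option Int) (out : Option (List (Int × Int × Int × Int))) : Decidable (Spec_create_translates d out) := by unfold Spec_create_translates; infer_instance

-- ===== CLAIM (what is proved, stated in full; the proofs are below) =====
def Claim_equal_create_translates : Prop := ∀ (d : Option Int), Dom_create_translates d → Pre_create_translates d → Spec_create_translates d (create_translates d)

-- ===== LEMMAS AND PROOFS =====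

lemma ctLoopA_ph4 (m : Nat) (hm : 1 ≤ m) :
    ∀ j k rest, j + k = m → 1 ≤ j →
    ctLoopA (m : Int) (m : Int) 0 (j + rest) (k : Int) ((m : Int) - k) 1 (-1) false =
      (List.range' k j).map (fun i => ((0:Int), (i : Int), (m : Int) - i, (0:Int))) ++
      ctLoopA (m : Int) (m : Int) 0 rest (m : Int) 0 (-1) (-1) false := by
  intro j
  induction j with
  | zero => intro k rest h h1; omega
  | succ j ih =>
    intro k rest hjk _
    rw [show j + 1 + rest = (j + rest) + 1 by omega]
    simp only [ctLoopA]
    rw [if_pos (by left; right; intro h; omega)]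
    by_cases hj : j = 0
    · subst hj
      have hk : k = m - 1 := by omega
      subst hk
      rw [if_pos (by rw [abs_eq (by positivity)]; left; omega)]
      rw [if_neg (by rw [abs_eq (by positivity)]; rintro (h|h) <;> omega)]
      rw [show ((m-1:Nat):Int) + 1 = (m:Int) by omega]
      rw [show (m:Int) - ((m-1:Nat):Int) + (-1) = 0 by omega]
      norm_num [List.range'_one]
    · rw [if_neg (by rw [abs_eq (by positivity)]; rintro (h|h) <;> omega)]
      rw [if_neg (by rw [abs_eq (by positivity)]; rintro (h|h) <;> omega)]
      rw [show (k:Int) + 1 = ((k+1 : Nat) : Int) by push_cast; ring]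
      rw [show (m:Int) - (k:Int) + (-1) = (m:Int) - ((k+1:Nat):Int) by push_cast; ring]
      rw [ih (k+1) rest (by omega) (by omega), List.range'_succ]
      simp

lemma ctLoopA_ph3 (m : Nat) (hm : 1 ≤ m) :
    ∀ j k rest, j + k = m → 1 ≤ j →
    ctLoopA (m : Int) (m : Int) 0 (j + rest) (-(m : Int) + k) (k : Int) 1 1 false =
      (List.range' k j).map (fun i => ((0:Int), -(m : Int) + i, (i : Int), (0:Int))) ++
      ctLoopA (m : Int) (m : Int) 0 rest 0 (m : Int) 1 (-1) false := by
  intro j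
  induction j with
  | zero => intro k rest h h1; omega
  | succ j ih =>
    intro k rest hjk _
    rw [show j + 1 + rest = (j + rest) + 1 by omega]
    simp only [ctLoopA]
    rw [if_pos (by left; left; intro h; omega)]
    by_cases hj : j = 0
    · subst hj
      have hk : k = m - 1 := by omega
      subst hk
      rw [if_neg (by rw [abs_eq (by positivity)]; rintro (h|h) <;> omega)]
      rw [if_pos (by rw [abs_eq (by positivity)]; left; omega)]
      rw [show -(m:Int) + ((m-1:Nat):Int) + 1 = 0 by omega]
      rw [show ((m-1:Nat):Int) + 1 = (m:Int) by omega]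
      norm_num [List.range'_one]
    · rw [if_neg (by rw [abs_eq (by positivity)]; rintro (h|h) <;> omega)]
      rw [if_neg (by rw [abs_eq (by positivity)]; rintro (h|h) <;> omega)]
      rw [show -(m:Int) + (k:Int) + 1 = -(m:Int) + ((k+1:Nat):Int) by push_cast; ring]
      rw [show (k:Int) + 1 = ((k+1 : Nat) : Int) by push_cast; ring]
      rw [ih (k+1) rest (by omega) (by omega), List.range'_succ]
      simp

lemma ctLoopA_ph2 (m : Nat) (hm : 1 ≤ m) :
    ∀ j k rest, j + k = m → 1 ≤ j →
    ctLoopA (m : Int) (m : Int) 0 (j + rest) (-(k : Int)) (-(m : Int) + k) (-1) 1 false =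
      (List.range' k j).map (fun i => ((0:Int), -(i : Int), -(m : Int) + i, (0:Int))) ++
      ctLoopA (m : Int) (m : Int) 0 rest (-(m : Int)) 0 1 1 false := by
  intro j
  induction j with
  | zero => intro k rest h h1; omega
  | succ j ih =>
    intro k rest hjk _
    rw [show j + 1 + rest = (j + rest) + 1 by omega]
    simp only [ctLoopA]
    rw [if_pos (by left; right; intro h; omega)]
    by_cases hj : j = 0
    · subst hj
      have hk : k = m - 1 := by omega
      subst hk
      rw [if_pos (by rw [abs_eq (by positivity)]; right; omega)]
      rw [if_neg (by rw [abs_eq (by positivity)]; rintro (h|h) <;> omega)]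
      rw [show -((m-1:Nat):Int) + -1 = -(m:Int) by omega]
      rw [show -(m:Int) + ((m-1:Nat):Int) + 1 = 0 by omega]
      norm_num [List.range'_one]
    · rw [if_neg (by rw [abs_eq (by positivity)]; rintro (h|h) <;> omega)]
      rw [if_neg (by rw [abs_eq (by positivity)]; rintro (h|h) <;> omega)]
      rw [show -(k:Int) + -1 = -((k+1 : Nat) : Int) by push_cast; ring]
      rw [show -(m:Int) + (k:Int) + 1 = -(m:Int) + ((k+1:Nat):Int) by push_cast; ring]
      rw [ih (k+1) rest (by omega) (by omega), List.range'_succ]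
      simp

lemma ctLoopA_ph1 (m : Nat) (hm : 1 ≤ m) :
    ∀ j k rest, j + k = m → 1 ≤ j → 1 ≤ k →
    ctLoopA (m : Int) (m : Int) 0 (j + rest) ((m : Int) - k) (-(k : Int)) (-1) (-1) false =
      (List.range' k j).map (fun i => ((0:Int), (m : Int) - i, -(i : Int), (0:Int))) ++
      ctLoopA (m : Int) (m : Int) 0 rest 0 (-(m : Int)) (-1) 1 false := by
  intro j
  induction j with
  | zero => intro k rest h h1; omega
  | succ j ih =>
    intro k rest hjk _ hk1
    rw [show j + 1 + rest = (j + rest) + 1 by omega]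
    simp only [ctLoopA]
    rw [if_pos (by left; right; intro h; omega)]
    by_cases hj : j = 0
    · subst hj
      have hk : k = m - 1 := by omega
      subst hk
      rw [if_neg (by rw [abs_eq (by positivity)]; rintro (h|h) <;> omega)]
      rw [if_pos (by rw [abs_eq (by positivity)]; right; omega)]
      rw [show (m:Int) - ((m-1:Nat):Int) + -1 = 0 by omega]
      rw [show -((m-1:Nat):Int) + -1 = -(m:Int) by omega]
      norm_num [List.range'_one]
    · rw [if_neg (by rw [abs_eq (by positivity)]; rintro (h|h) <;> omega)]
      rw [if_neg (by rw [abs_eq (by positivity)]; rintro (h|h) <;> omega)]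
      rw [show (m:Int) - (k:Int) + -1 = (m:Int) - ((k+1:Nat):Int) by push_cast; ring]
      rw [show -(k:Int) + -1 = -((k+1 : Nat) : Int) by push_cast; ring]
      rw [ih (k+1) rest (by omega) (by omega) (by omega), List.range'_succ]
      simp
lemma ct_main (m : Nat) (hm : 2 ≤ m) :
    create_translates (some (m : Int)) = create_translates_alt (some (m : Int)) := by
  have hm0 : ((m:Int)) ≠ 0 := by omega
  have hm1 : 1 ≤ m := by omega
  simp only [create_translates, create_translates_alt, if_neg hm0, Int.toNat_natCast]
  rw [show ((4 * (m:Int)).toNat) = 4 * m by omega]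
  -- first iteration (ft = true)
  simp only [ctLoopA]
  rw [if_pos (by right; simp)]
  rw [if_neg (by rw [abs_eq (by positivity)]; rintro (h|h) <;> omega)]
  rw [if_neg (by rw [abs_eq (by positivity)]; rintro (h|h) <;> omega)]
  rw [show (m:Int) + -1 = (m:Int) - ((1:Nat):Int) by push_cast; ring]
  rw [show (0:Int) + -1 = -((1:Nat):Int) by norm_num]
  rw [show 4 * m = (m - 1) + (3 * m + 1) by omega]
  rw [ctLoopA_ph1 m hm1 (m-1) 1 (3*m+1) (by omega) (by omega) (by omega)]
  have h2 := ctLoopA_ph2 m hm1 m 0 (2*m+1) (by omega) (by omega)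
  rw [show (-((0:Nat):Int)) = 0 from by norm_num, show (-(m:Int) + ((0:Nat):Int)) = -(m:Int) from by norm_num] at h2
  rw [show 3 * m + 1 = m + (2 * m + 1) by omega, h2]
  have h3 := ctLoopA_ph3 m hm1 m 0 (m+1) (by omega) (by omega)
  rw [show (-(m:Int) + ((0:Nat):Int)) = -(m:Int) from by norm_num, show (((0:Nat):Int)) = 0 from by norm_num] at h3
  rw [show 2 * m + 1 = m + (m + 1) by omega, h3]
  have h4 := ctLoopA_ph4 m hm1 m 0 1 (by omega) (by omega)
  rw [show ((m:Int) - ((0:Nat):Int)) = (m:Int) from by norm_num, show (((0:Nat):Int)) = 0 from by norm_num] at h4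
  rw [h4]
  -- final call exits immediately
  simp only [ctLoopA]
  rw [if_neg (by simp)]
  -- assemble
  have hr : List.range m = 0 :: List.range' 1 (m-1) := by
    rw [List.range_eq_range', show m = (m-1)+1 by omega, List.range'_succ]
    simp
  have hr2 : List.range' 0 m = 0 :: List.range' 1 (m-1) := by
    rw [← List.range_eq_range', hr]
  conv_rhs => rw [hr]
  rw [hr2]
  simp [List.append_assoc]


-- ===== VERDICT (by name: the statement is the Claim_ definition above) =====
theorem create_translates_spec : Claim_equal_create_translates := by
  intro d _ hpre
  unfold Pre_create_translates at hpre
  show create_translates d = create_translates_alt d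
  match d with
  | none => rfl
  | some dv =>
    simp only [Option.getD] at hpre
    by_cases h0 : dv = 0
    · subst h0; rfl
    · by_cases h1 : dv = 1
      · subst h1; decide
      · have hm : 2 ≤ dv.toNat := by omega
        have hdv : dv = ((dv.toNat : Nat) : Int) := by omega
        rw [hdv]
        exact ct_main dv.toNat hm
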